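-- pv_equiv track=rewrite | github.com/The-Almost-Retired-Dandelion-Eater/Eldobot | basics.py | rating_names
-- ===== SOURCE A (Python) =====
-- def rating_names(text):
--     text = str.lower(text)
--     ratingTerms = {
--         "hgt": ['height', 'tall', 'tallness', 'size', 'stature',],
--         "stre": ['strength', 'muscle', 'toughness', 'fat', 'big', 'heavy', 'wide'],
--         "spd": ['speed', 'quick', 'quickness', 'rapidity', 'velocity', 'agility', 'acceleration'],
--         "jmp": ['jump', 'jumping', 'vertical', 'leap', 'leaping', 'bounce', 'hop'],
--         "endu": ['endurance', 'stamina', 'cardio', 'resilience', 'sustainability'],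
--         "ins": ['inside', 'post', 'interior', 'paint', 'lowpost', 'closerange'],
--         "dnk": ['dunks', 'layups', 'dunks/layups', 'slashing', 'driving', 'finishing'],
--         "ft": ['freethrows', 'freethrow', 'foulshot', 'free'],
--         "fg": ['midrange', '2pt', 'twopoint', 'twopointers', 'two', '2p'],
--         "tp": ['threepoint', 'outside', 'range', '3pt', 'three', 'triple', '3p'],
--         "oiq": ['offensiveiq', 'offense', 'offensiveawareness'],
--         "diq": ['defensiveiq', 'defense', 'defensiveawareness'],
--         "drb": ['dribbling', 'handling', 'handles', 'control', 'ballhandling'],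
--         "pss": ['passing', 'pass', 'playmaking', 'pas', 'assist'],
--         "reb": ['rebounding', 'boards', 'board', 'rebound', 'boxout', 'box']
--     }
--     for r, t in ratingTerms.items():
--         for thing in t:
--             if text == thing:
--                 text = r
--     return text
-- ===== SOURCE B (Python) =====
-- # Flat term -> rating-abbreviation index; one lookup per call.
-- _TERM_TO_RATING = {
--     "height": "hgt",
--     "tall": "hgt",
--     "tallness": "hgt",
--     "size": "hgt",
--     "stature": "hgt",
--     "strength": "stre",
--     "muscle": "stre",
--     "toughness": "stre",
--     "fat": "stre",
--     "big": "stre",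
--     "heavy": "stre",
--     "wide": "stre",
--     "speed": "spd",
--     "quick": "spd",
--     "quickness": "spd",
--     "rapidity": "spd",
--     "velocity": "spd",
--     "agility": "spd",
--     "acceleration": "spd",
--     "jump": "jmp",
--     "jumping": "jmp",
--     "vertical": "jmp",
--     "leap": "jmp",
--     "leaping": "jmp",
--     "bounce": "jmp",
--     "hop": "jmp",
--     "endurance": "endu",
--     "stamina": "endu",
--     "cardio": "endu",
--     "resilience": "endu",
--     "sustainability": "endu",
--     "inside": "ins",
--     "post": "ins",
--     "interior": "ins",
--     "paint": "ins",
--     "lowpost": "ins",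
--     "closerange": "ins",
--     "dunks": "dnk",
--     "layups": "dnk",
--     "dunks/layups": "dnk",
--     "slashing": "dnk",
--     "driving": "dnk",
--     "finishing": "dnk",
--     "freethrows": "ft",
--     "freethrow": "ft",
--     "foulshot": "ft",
--     "free": "ft",
--     "midrange": "fg",
--     "2pt": "fg",
--     "twopoint": "fg",
--     "twopointers": "fg",
--     "two": "fg",
--     "2p": "fg",
--     "threepoint": "tp",
--     "outside": "tp",
--     "range": "tp",
--     "3pt": "tp",
--     "three": "tp",
--     "triple": "tp",
--     "3p": "tp",
--     "offensiveiq": "oiq",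
--     "offense": "oiq",
--     "offensiveawareness": "oiq",
--     "defensiveiq": "diq",
--     "defense": "diq",
--     "defensiveawareness": "diq",
--     "dribbling": "drb",
--     "handling": "drb",
--     "handles": "drb",
--     "control": "drb",
--     "ballhandling": "drb",
--     "passing": "pss",
--     "pass": "pss",
--     "playmaking": "pss",
--     "pas": "pss",
--     "assist": "pss",
--     "rebounding": "reb",
--     "boards": "reb",
--     "board": "reb",
--     "rebound": "reb",
--     "boxout": "reb",
--     "box": "reb",
-- }
--
-- def rating_names(text):
--     text = str.lower(text)
--     return _TERM_TO_RATING.get(text, text)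
-- ===== Notes on version B (the rewrite author's own statement) =====
-- stated objective: idiomatic
-- what changed: Replaces A's stateful nested scan over 15 term groups with a flat term->abbreviation dict built once at module load, so each call is a lowercase plus one dict lookup with the lowercased text as its own default.
import Mathlib
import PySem

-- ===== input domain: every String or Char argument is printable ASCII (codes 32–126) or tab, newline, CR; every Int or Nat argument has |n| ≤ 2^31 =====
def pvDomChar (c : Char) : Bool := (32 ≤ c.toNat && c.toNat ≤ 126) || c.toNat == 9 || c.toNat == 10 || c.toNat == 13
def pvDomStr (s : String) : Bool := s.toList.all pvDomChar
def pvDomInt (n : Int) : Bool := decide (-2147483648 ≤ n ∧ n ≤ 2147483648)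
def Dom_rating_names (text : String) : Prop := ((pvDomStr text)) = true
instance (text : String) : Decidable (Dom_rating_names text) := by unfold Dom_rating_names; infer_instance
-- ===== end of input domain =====

-- B replaces A's stateful nested scan over 15 term groups with a flat term→abbreviation
-- dict built once; each call is a lowercase plus one lookup (idiomatic).

-- ===== PORT A =====
-- A's ratingTerms dict literal, in insertion order
def ratingTermsList : List (String × List String) := [
  ("hgt", ["height", "tall", "tallness", "size", "stature"]),
  ("stre", ["strength", "muscle", "toughness", "fat", "big", "heavy", "wide"]),
  ("spd", ["speed", "quick", "quickness", "rapidity", "velocity", "agility", "acceleration"]),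
  ("jmp", ["jump", "jumping", "vertical", "leap", "leaping", "bounce", "hop"]),
  ("endu", ["endurance", "stamina", "cardio", "resilience", "sustainability"]),
  ("ins", ["inside", "post", "interior", "paint", "lowpost", "closerange"]),
  ("dnk", ["dunks", "layups", "dunks/layups", "slashing", "driving", "finishing"]),
  ("ft", ["freethrows", "freethrow", "foulshot", "free"]),
  ("fg", ["midrange", "2pt", "twopoint", "twopointers", "two", "2p"]),
  ("tp", ["threepoint", "outside", "range", "3pt", "three", "triple", "3p"]),
  ("oiq", ["offensiveiq", "offense", "offensiveawareness"]),
  ("diq", ["defensiveiq", "defense", "defensiveawareness"]),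
  ("drb", ["dribbling", "handling", "handles", "control", "ballhandling"]),
  ("pss", ["passing", "pass", "playmaking", "pas", "assist"]),
  ("reb", ["rebounding", "boards", "board", "rebound", "boxout", "box"])]

def rating_names (text : String) : String :=
  let text := PySem.Str.lower text
  ratingTermsList.foldl
    (fun text p => p.2.foldl (fun text thing => if text == thing then p.1 else text) text)
    text

-- ===== PORT B =====
-- the flat _TERM_TO_RATING dict literal of Source B, in its insertion order
def termIndex : PySem.Dict String String := PySem.Dict.ofList [
  ("height", "hgt"),
  ("tall", "hgt"),
  ("tallness", "hgt"),
  ("size", "hgt"),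
  ("stature", "hgt"),
  ("strength", "stre"),
  ("muscle", "stre"),
  ("toughness", "stre"),
  ("fat", "stre"),
  ("big", "stre"),
  ("heavy", "stre"),
  ("wide", "stre"),
  ("speed", "spd"),
  ("quick", "spd"),
  ("quickness", "spd"),
  ("rapidity", "spd"),
  ("velocity", "spd"),
  ("agility", "spd"),
  ("acceleration", "spd"),
  ("jump", "jmp"),
  ("jumping", "jmp"),
  ("vertical", "jmp"),
  ("leap", "jmp"),
  ("leaping", "jmp"),
  ("bounce", "jmp"),
  ("hop", "jmp"),
  ("endurance", "endu"),
  ("stamina", "endu"),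
  ("cardio", "endu"),
  ("resilience", "endu"),
  ("sustainability", "endu"),
  ("inside", "ins"),
  ("post", "ins"),
  ("interior", "ins"),
  ("paint", "ins"),
  ("lowpost", "ins"),
  ("closerange", "ins"),
  ("dunks", "dnk"),
  ("layups", "dnk"),
  ("dunks/layups", "dnk"),
  ("slashing", "dnk"),
  ("driving", "dnk"),
  ("finishing", "dnk"),
  ("freethrows", "ft"),
  ("freethrow", "ft"),
  ("foulshot", "ft"),
  ("free", "ft"),
  ("midrange", "fg"),
  ("2pt", "fg"),
  ("twopoint", "fg"),
  ("twopointers", "fg"),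
  ("two", "fg"),
  ("2p", "fg"),
  ("threepoint", "tp"),
  ("outside", "tp"),
  ("range", "tp"),
  ("3pt", "tp"),
  ("three", "tp"),
  ("triple", "tp"),
  ("3p", "tp"),
  ("offensiveiq", "oiq"),
  ("offense", "oiq"),
  ("offensiveawareness", "oiq"),
  ("defensiveiq", "diq"),
  ("defense", "diq"),
  ("defensiveawareness", "diq"),
  ("dribbling", "drb"),
  ("handling", "drb"),
  ("handles", "drb"),
  ("control", "drb"),
  ("ballhandling", "drb"),
  ("passing", "pss"),
  ("pass", "pss"),
  ("playmaking", "pss"),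
  ("pas", "pss"),
  ("assist", "pss"),
  ("rebounding", "reb"),
  ("boards", "reb"),
  ("board", "reb"),
  ("rebound", "reb"),
  ("boxout", "reb"),
  ("box", "reb")]

def rating_names_alt (text : String) : String :=
  let text := PySem.Str.lower text
  termIndex.getD text text

-- ===== PRECONDITION & SPEC =====
def Spec_rating_names (text : String) (out : String) : Prop := out = rating_names_alt text
instance (text : String) (out : String) : Decidable (Spec_rating_names text out) := by unfold Spec_rating_names; infer_instance

-- ===== CLAIM (what is proved, stated in full; the proofs are below) =====
def Claim_equal_rating_names : Prop := ∀ (text : String), Dom_rating_names text → Spec_rating_names text (rating_names text)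

-- ===== LEMMAS AND PROOFS =====

-- the rating of the first group whose term list contains s
def firstMatch? (pairs : List (String × List String)) (s : String) : Option String :=
  (pairs.find? (fun p => p.2.contains s)).map (·.1)

-- A's inner loop: replace s by r iff s occurs in ts
theorem innerA (r s : String) (ts : List String) :
    ts.foldl (fun t thing => if t == thing then r else t) s =
      if ts.contains s then r else s := by
  induction ts generalizing s with
  | nil => rfl
  | cons a ts ih =>
    rw [List.foldl_cons]
    by_cases h : s = a
    · subst h
      rw [if_pos (by simp), ih r, List.contains_cons]
      simp only [BEq.rfl, Bool.true_or, if_pos]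
      split <;> rfl
    · have hb : (s == a) = false := by simpa using h
      rw [if_neg (by simp [hb]), ih s, List.contains_cons, hb, Bool.false_or]

-- A's outer loop leaves a state that matches no term list untouched
theorem outerA_fix (pairs : List (String × List String)) (x : String)
    (h : ∀ q ∈ pairs, q.2.contains x = false) :
    pairs.foldl (fun t p => p.2.foldl (fun t thing => if t == thing then p.1 else t) t) x = x := by
  induction pairs with
  | nil => rfl
  | cons p rest ih =>
    rw [List.foldl_cons, innerA, h p (List.mem_cons_self), if_neg (by simp)]
    exact ih (fun q hq => h q (List.mem_cons_of_mem _ hq))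

theorem outerA (pairs : List (String × List String)) (s : String)
    (hk : ∀ p ∈ pairs, ∀ q ∈ pairs, q.2.contains p.1 = false) :
    pairs.foldl (fun t p => p.2.foldl (fun t thing => if t == thing then p.1 else t) t) s =
      (firstMatch? pairs s).getD s := by
  induction pairs with
  | nil => rfl
  | cons p rest ih =>
    rw [List.foldl_cons, innerA]
    by_cases h : p.2.contains s = true
    · rw [if_pos h]
      have hfix := outerA_fix rest p.1
        (fun q hq => hk p (List.mem_cons_self) q (List.mem_cons_of_mem _ hq))
      have hfind : List.find? (fun q => q.2.contains s) (p :: rest) = some p := by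
        rw [List.find?_cons_of_pos]; exact h
      rw [hfix]
      simp only [firstMatch?]
      rw [hfind]
      rfl
    · have hb : p.2.contains s = false := by simpa using h
      have hfind : List.find? (fun q => q.2.contains s) (p :: rest) =
          List.find? (fun q => q.2.contains s) rest := by
        rw [List.find?_cons_of_neg]; simpa using hb
      rw [if_neg (by simpa using hb)]
      rw [ih (fun a ha q hq => hk a (List.mem_cons_of_mem _ ha) q (List.mem_cons_of_mem _ hq))]
      simp only [firstMatch?]
      rw [hfind]

-- the fully evaluated flat index: insert each group's terms with its rating, in A's order
def nestedIndex : PySem.Dict String String :=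
  ratingTermsList.foldl
    (fun d p => p.2.foldl (fun d term => d.insert term p.1) d)
    PySem.Dict.empty

-- Source B's flat literal dict is exactly the dict built by inserting A's table group by group
set_option maxRecDepth 10000 in
theorem termIndex_eq_nested : termIndex = nestedIndex := by decide

-- insert of a whole group carries the same value r
theorem innerB (r s : String) (ts : List String) (d : PySem.Dict String String) :
    (ts.foldl (fun d term => d.insert term r) d).get? s =
      if ts.contains s then some r else d.get? s := by
  induction ts generalizing d with
  | nil => rfl
  | cons a ts ih =>
    rw [List.foldl_cons, ih, List.contains_cons]
    by_cases h : ts.contains s = true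
    · have hm : s ∈ ts := by simpa using h
      simp [hm]
    · have hb : ts.contains s = false := by simpa using h
      by_cases hs : s = a
      · subst hs; simp [PySem.Dict.get?_insert_self]
      · simp [PySem.Dict.get?_insert_of_ne _ _ hs,
          show (s == a) = false by simpa using hs]

-- with pairwise-distinct terms, the dict answers the first (= only) matching group
theorem buildB (pairs : List (String × List String)) (d : PySem.Dict String String) (s : String)
    (hnd : (pairs.flatMap (·.2)).Nodup) :
    (pairs.foldl (fun d p => p.2.foldl (fun d term => d.insert term p.1) d) d).get? s =
      match firstMatch? pairs s with
      | some r => some r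
      | none => d.get? s := by
  induction pairs generalizing d with
  | nil => rfl
  | cons p rest ih =>
    simp only [List.flatMap_cons, List.nodup_append] at hnd
    rw [List.foldl_cons, ih _ hnd.2.1]
    by_cases h : p.2.contains s = true
    · have hs : s ∈ p.2 := by simpa using h
      have hsf : s ∉ rest.flatMap (·.2) := fun hm => hnd.2.2 s hs s hm rfl
      have hfm : (rest.find? (fun p => p.2.contains s)) = none := by
        apply List.find?_eq_none.mpr
        intro q hq hc
        exact hsf (List.mem_flatMap.mpr ⟨q, hq, by simpa using hc⟩)
      have hfind : List.find? (fun q => q.2.contains s) (p :: rest) = some p := by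
        rw [List.find?_cons_of_pos]; exact h
      simp only [firstMatch?]
      rw [hfind, hfm, innerB]
      simp [hs]
    · have hb : p.2.contains s = false := by simpa using h
      have hfind : List.find? (fun q => q.2.contains s) (p :: rest) =
          List.find? (fun q => q.2.contains s) rest := by
        rw [List.find?_cons_of_neg]; simpa using hb
      simp only [firstMatch?]
      rw [hfind, innerB, hb]
      simp

theorem keysNotTerms_holds :
    ∀ p ∈ ratingTermsList, ∀ q ∈ ratingTermsList, q.2.contains p.1 = false := by
  decide

theorem terms_nodup : (ratingTermsList.flatMap (·.2)).Nodup := by decide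

-- ===== VERDICT (by name: the statement is the Claim_ definition above) =====
theorem rating_names_spec : Claim_equal_rating_names := by
  intro text _
  show rating_names text = rating_names_alt text
  unfold rating_names rating_names_alt
  rw [outerA _ _ keysNotTerms_holds, PySem.Dict.getD_eq_get?_getD,
    termIndex_eq_nested]
  unfold nestedIndex
  rw [buildB _ _ _ terms_nodup]
  cases h : firstMatch? ratingTermsList (PySem.Str.lower text) <;>
    simp [PySem.Dict.get?_empty]
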